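-- pv_equiv track=rewrite | github.com/kwheelan/COD-budget-helper-scripts | scripts/budget_book/models/baseTable.py | create_multirow_blocks
-- ===== SOURCE A (Python) =====
-- def create_multirow_blocks(rows: list[str], col_ix: int):
--     """Identify blocks of rows that should be merged as multirows."""
--     multirow_blocks = []
--     current_block = []
--
--     for row in rows:
--         if not row.strip():
--             continue
--
--         cells = row.split(' & ')
--         current_value = cells[col_ix].strip()
--
--         if current_value != '':
--             if current_block:
--                 multirow_blocks.append(current_block)
--             current_block = [cells]
--         else:
--             current_block.append(cells)
--
--     if current_block:
--         multirow_blocks.append(current_block)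
--
--     return multirow_blocks
-- ===== SOURCE B (Python) =====
-- def create_multirow_blocks(rows: list[str], col_ix: int):
--     """Identify blocks of rows that should be merged as multirows.
--
--     Split-points decomposition: filter/split once, then cut the list into a
--     leading run of continuation rows (orphan block) followed by one block per
--     header row (the header plus the continuation rows after it)."""
--     filtered = [r.split(' & ') for r in rows if r.strip()]
--
--     def is_cont(cells):
--         return cells[col_ix].strip() == ''
--
--     def blocks(lst):
--         # lst starts with a header row (or is empty)
--         if not lst:
--             return []
--         head, rest = lst[0], lst[1:]
--         k = 0
--         while k < len(rest) and is_cont(rest[k]):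
--             k += 1
--         return [[head] + rest[:k]] + blocks(rest[k:])
--
--     lead = 0
--     while lead < len(filtered) and is_cont(filtered[lead]):
--         lead += 1
--     head_part = [filtered[:lead]] if lead else []
--     return head_part + blocks(filtered[lead:])
-- ===== Notes on version B (the rewrite author's own statement) =====
-- stated objective: alternative
-- what changed: Replaces A's stateful accumulate-and-flush loop (current_block mutated and flushed at each header and at the end) with a split-points decomposition: filter and split all rows once, peel off the leading run of continuation rows as the orphan block, then recursively cut one block per header row.
import Mathlib
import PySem

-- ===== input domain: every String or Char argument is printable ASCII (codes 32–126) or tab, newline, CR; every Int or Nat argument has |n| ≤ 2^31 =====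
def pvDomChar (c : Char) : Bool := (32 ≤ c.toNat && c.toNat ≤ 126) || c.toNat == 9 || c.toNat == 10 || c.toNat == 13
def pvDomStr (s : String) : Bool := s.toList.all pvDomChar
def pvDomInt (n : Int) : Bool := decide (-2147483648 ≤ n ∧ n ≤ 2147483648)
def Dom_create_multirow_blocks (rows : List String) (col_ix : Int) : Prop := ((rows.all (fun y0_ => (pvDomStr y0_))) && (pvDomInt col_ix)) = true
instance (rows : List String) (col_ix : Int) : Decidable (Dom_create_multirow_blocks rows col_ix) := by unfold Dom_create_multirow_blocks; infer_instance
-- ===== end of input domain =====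

-- B replaces A's stateful accumulate-and-flush loop with a split-points decomposition
-- (filter/split once, peel the leading continuation run, then one block per header): alternative, same cost.


-- shared primitive: row.split(' & ')  (split? is some for a non-empty separator; [row] is never used)
def pvCells (row : String) : List String :=
  (PySem.Str.split? row " & ").getD [row]

-- ===== PORT A =====
-- A's loop: fold over rows with state (multirow_blocks, current_block), flushing at each header and at the end.
def create_multirow_blocks (rows : List String) (col_ix : Int) : List (List (List String)) :=
  let st := rows.foldl
    (fun (st : List (List (List String)) × List (List String)) row =>
      if PySem.Str.strip row = "" then st
      else
        let cells := pvCells row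
        -- cells[col_ix] raises IndexError when out of range: excluded by Pre_; "" is a dummy
        let current_value := PySem.Str.strip ((PySem.List.pyGet? cells col_ix).getD "")
        if current_value ≠ "" then
          ((if st.2 ≠ [] then st.1 ++ [st.2] else st.1), [cells])
        else
          (st.1, st.2 ++ [cells]))
    ([], [])
  if st.2 ≠ [] then st.1 ++ [st.2] else st.1

-- ===== PORT B =====
-- cells[col_ix].strip() == ''  (same dummy convention outside Pre_)
def pvIsCont (col_ix : Int) (cells : List String) : Bool :=
  PySem.Str.strip ((PySem.List.pyGet? cells col_ix).getD "") == ""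

-- Source B's 'blocks': the list starts with a header; take its continuation run (the rest[:k] scan), recurse on the remainder
def pvBlocks (col_ix : Int) : List (List String) → List (List (List String))
  | [] => []
  | h :: rest =>
      (h :: rest.takeWhile (pvIsCont col_ix)) :: pvBlocks col_ix (rest.dropWhile (pvIsCont col_ix))
termination_by l => l.length
decreasing_by
  simpa using Nat.lt_succ_of_le (List.length_dropWhile_le (pvIsCont col_ix) rest)

def create_multirow_blocks_alt (rows : List String) (col_ix : Int) : List (List (List String)) :=
  let filtered := (rows.filter (fun r => PySem.Str.strip r ≠ "")).map pvCells
  let lead := filtered.takeWhile (pvIsCont col_ix)          -- the 'lead' counting loop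
  let head_part := if lead ≠ [] then [lead] else []
  head_part ++ pvBlocks col_ix (filtered.dropWhile (pvIsCont col_ix))

-- ===== PRECONDITION & SPEC =====
-- Pre_ excludes exactly the inputs where A raises IndexError: some non-blank row whose ' & '-split lacks index col_ix.
def Pre_create_multirow_blocks (rows : List String) (col_ix : Int) : Prop :=
  ∀ row ∈ rows, PySem.Str.strip row ≠ "" → PySem.Raise.InRange (pvCells row).length col_ix
instance (rows : List String) (col_ix : Int) : Decidable (Pre_create_multirow_blocks rows col_ix) := by
  unfold Pre_create_multirow_blocks; infer_instance

def pvWitness_create_multirow_blocks : List String × Int :=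
  (["Dept & 100", " & 20", "", "Other & 5"], 0)

def Spec_create_multirow_blocks (rows : List String) (col_ix : Int) (out : List (List (List String))) : Prop := out = create_multirow_blocks_alt rows col_ix
instance (rows : List String) (col_ix : Int) (out : List (List (List String))) : Decidable (Spec_create_multirow_blocks rows col_ix out) := by unfold Spec_create_multirow_blocks; infer_instance

-- ===== CLAIM (what is proved, stated in full; the proofs are below) =====
def Claim_equal_create_multirow_blocks : Prop := ∀ (rows : List String) (col_ix : Int), Dom_create_multirow_blocks rows col_ix → Pre_create_multirow_blocks rows col_ix → Spec_create_multirow_blocks rows col_ix (create_multirow_blocks rows col_ix)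

-- ===== LEMMAS AND PROOFS =====

-- A's loop step, on already-split cells, and its final flush
def pvStep (col_ix : Int) (st : List (List (List String)) × List (List String))
    (cells : List String) : List (List (List String)) × List (List String) :=
  if PySem.Str.strip ((PySem.List.pyGet? cells col_ix).getD "") ≠ "" then
    ((if st.2 ≠ [] then st.1 ++ [st.2] else st.1), [cells])
  else
    (st.1, st.2 ++ [cells])

def pvFlush (st : List (List (List String)) × List (List String)) : List (List (List String)) :=
  if st.2 ≠ [] then st.1 ++ [st.2] else st.1

-- A's per-row step (the loop body on a raw row)
def pvStepRow (col_ix : Int) (st : List (List (List String)) × List (List String))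
    (row : String) : List (List (List String)) × List (List String) :=
  if PySem.Str.strip row = "" then st
  else
    let cells := pvCells row
    let current_value := PySem.Str.strip ((PySem.List.pyGet? cells col_ix).getD "")
    if current_value ≠ "" then
      ((if st.2 ≠ [] then st.1 ++ [st.2] else st.1), [cells])
    else
      (st.1, st.2 ++ [cells])

lemma pvStepRow_blank (col_ix : Int) (st : List (List (List String)) × List (List String))
    (row : String) (h : PySem.Str.strip row = "") : pvStepRow col_ix st row = st := by
  simp [pvStepRow, h]

lemma pvStepRow_nonblank (col_ix : Int) (st : List (List (List String)) × List (List String))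
    (row : String) (h : ¬ PySem.Str.strip row = "") :
    pvStepRow col_ix st row = pvStep col_ix st (pvCells row) := by
  simp [pvStepRow, pvStep, h]

lemma pvBlocks_nil (col_ix : Int) : pvBlocks col_ix [] = [] := by
  unfold pvBlocks; rfl

lemma pvBlocks_cons (col_ix : Int) (h : List String) (rest : List (List String)) :
    pvBlocks col_ix (h :: rest)
      = (h :: rest.takeWhile (pvIsCont col_ix)) :: pvBlocks col_ix (rest.dropWhile (pvIsCont col_ix)) := by
  rw [pvBlocks]

-- A's fold over rows is pvStep folded over the filtered, split rows
lemma pvFold_rows (col_ix : Int) (rows : List String)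
    (st : List (List (List String)) × List (List String)) :
    rows.foldl (pvStepRow col_ix) st
    = ((rows.filter (fun r => PySem.Str.strip r ≠ "")).map pvCells).foldl (pvStep col_ix) st := by
  induction rows generalizing st with
  | nil => rfl
  | cons r t ih =>
      by_cases h : PySem.Str.strip r = ""
      · rw [List.foldl_cons, pvStepRow_blank col_ix st r h,
          show List.filter (fun r => decide (PySem.Str.strip r ≠ "")) (r :: t)
              = List.filter (fun r => decide (PySem.Str.strip r ≠ "")) t by simp [h]]
        exact ih st
      · rw [List.foldl_cons, pvStepRow_nonblank col_ix st r h,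
          show List.filter (fun r => decide (PySem.Str.strip r ≠ "")) (r :: t)
              = r :: List.filter (fun r => decide (PySem.Str.strip r ≠ "")) t by simp [h],
          List.map_cons, List.foldl_cons]
        exact ih _

-- main invariant: with a non-empty current block, the flushed fold is the block grown by the
-- continuation run, then pvBlocks of the remainder
lemma pvFold_inv (col_ix : Int) (l : List (List String))
    (acc : List (List (List String))) (cur : List (List String)) (hcur : cur ≠ []) :
    pvFlush (l.foldl (pvStep col_ix) (acc, cur))
      = acc ++ (cur ++ l.takeWhile (pvIsCont col_ix)) :: pvBlocks col_ix (l.dropWhile (pvIsCont col_ix)) := by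
  induction l generalizing acc cur with
  | nil => simp [pvFlush, hcur, pvBlocks_nil]
  | cons c t ih =>
      by_cases hc : pvIsCont col_ix c = true
      · have hstep : pvStep col_ix (acc, cur) c = (acc, cur ++ [c]) := by
          simp only [pvIsCont, beq_iff_eq] at hc
          simp [pvStep, hc]
        rw [List.foldl_cons, hstep, ih acc (cur ++ [c]) (by simp)]
        simp [hc]
      · have hc' : PySem.Str.strip ((PySem.List.pyGet? c col_ix).getD "") ≠ "" := by
          simpa [pvIsCont] using hc
        have hstep : pvStep col_ix (acc, cur) c = (acc ++ [cur], [c]) := by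
          simp [pvStep, hc', hcur]
        rw [List.foldl_cons, hstep, ih (acc ++ [cur]) [c] (by simp)]
        simp [hc, pvBlocks_cons]

-- starting from the empty current block yields exactly B's decomposition
lemma pvFold_start (col_ix : Int) (l : List (List String)) :
    pvFlush (l.foldl (pvStep col_ix) ([], []))
      = (if l.takeWhile (pvIsCont col_ix) ≠ [] then [l.takeWhile (pvIsCont col_ix)] else [])
        ++ pvBlocks col_ix (l.dropWhile (pvIsCont col_ix)) := by
  cases l with
  | nil => simp [pvFlush, pvBlocks_nil]
  | cons c t =>
      have hstep : pvStep col_ix (([] : List (List (List String))), ([] : List (List String))) c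
          = ([], [c]) := by
        by_cases hc : PySem.Str.strip ((PySem.List.pyGet? c col_ix).getD "") ≠ "" <;>
          simp [pvStep, hc]
      rw [List.foldl_cons, hstep, pvFold_inv col_ix t [] [c] (by simp)]
      by_cases hc : pvIsCont col_ix c = true
      · simp [hc]
      · simp [hc, pvBlocks_cons]

-- ===== VERDICT (by name: the statement is the Claim_ definition above) =====
theorem create_multirow_blocks_spec : Claim_equal_create_multirow_blocks := by
  intro rows col_ix _ _
  show create_multirow_blocks rows col_ix = create_multirow_blocks_alt rows col_ix
  have hA : create_multirow_blocks rows col_ix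
      = pvFlush (rows.foldl (pvStepRow col_ix) ([], [])) := rfl
  rw [hA, pvFold_rows]
  exact pvFold_start col_ix _
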